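-- pv_equiv track=rewrite | github.com/ThibaudPiccinali/STA-Dr-ne | Repartition taches/repartition_final.py | choix_paires_imposed_parity
-- ===== SOURCE A (Python) =====
-- def choix_paires_imposed_parity(L): #Dans le cas où le rallongement du chemin se fait par le coté "court" (qui serpente), on ne peut pas choisir n'importe quel paires de tuiles adjactentes pour rallonger le chemin. Il faut choisir une paire adjacentes à un virage. Ainsi, on peut juste choisir entre deux choix : l'un où le chemin commence sur le coté opposé (pour avoir des débuts de virages tout les cases paires), et l'inverse. Cette fonction compare les deux choix:
--     choix_impaires = 0
--     choix_paires = 0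
--     for k in range(len(L)-1):
--         if(k%2 == 0):
--             choix_paires += 2*min(L[k],L[k+1])
--         else:
--             choix_impaires += 2*min(L[k],L[k+1])
--     return(choix_paires,choix_impaires)
-- ===== SOURCE B (Python) =====
-- def choix_paires_imposed_parity(L):
--     # Back-to-front accumulation with accumulator swapping: walking the adjacent
--     # pairs from the end, each step shifts parity, so swapping (p, i) replaces
--     # any parity test or index bookkeeping.
--     p = i = 0
--     for a, b in reversed(list(zip(L, L[1:]))):
--         p, i = 2 * min(a, b) + i, p
--     return (p, i)
-- ===== Notes on version B (the rewrite author's own statement) =====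
-- stated objective: alternative
-- what changed: Replaces A's forward index loop with an explicit parity test (k % 2) by a back-to-front traversal of the adjacent pairs that swaps the two accumulators at every step, so no index or parity computation is ever performed.
import Mathlib
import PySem

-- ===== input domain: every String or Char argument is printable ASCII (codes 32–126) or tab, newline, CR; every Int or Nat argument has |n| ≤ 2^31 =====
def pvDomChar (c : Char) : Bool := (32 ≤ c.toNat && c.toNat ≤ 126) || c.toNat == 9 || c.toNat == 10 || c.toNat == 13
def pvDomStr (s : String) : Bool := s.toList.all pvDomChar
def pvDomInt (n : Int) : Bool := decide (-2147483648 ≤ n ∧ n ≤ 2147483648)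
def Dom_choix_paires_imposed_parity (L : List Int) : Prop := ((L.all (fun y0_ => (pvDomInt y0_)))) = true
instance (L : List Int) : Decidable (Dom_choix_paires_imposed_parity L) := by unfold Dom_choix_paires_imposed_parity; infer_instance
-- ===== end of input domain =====

-- B traverses the adjacent pairs back-to-front, swapping the two accumulators each step,
-- instead of A's forward index loop with a parity test (alternative decomposition, same cost).


-- ===== PORT A =====
-- literal port: one loop over k in range(len(L)-1), branching on k % 2,
-- state (choix_paires, choix_impaires), returned in that order as in the Python
def choix_paires_imposed_parity (L : List Int) : Int × Int :=
  (PySem.List.pyRange 0 (PySem.List.len L - 1) 1).foldl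
    (fun (st : Int × Int) k =>
      if PySem.Int.mod k 2 = 0 then
        (st.1 + 2 * min (PySem.List.pyGetD L k 0) (PySem.List.pyGetD L (k + 1) 0), st.2)
      else
        (st.1, st.2 + 2 * min (PySem.List.pyGetD L k 0) (PySem.List.pyGetD L (k + 1) 0)))
    (0, 0)

-- ===== PORT B =====
-- literal port of Source B: fold over reversed(list(zip(L, L[1:]))) with the swap body
-- p, i = 2*min(a,b) + i, p; return (p, i).
def choix_paires_imposed_parity_alt (L : List Int) : Int × Int :=
  ((L.zip (PySem.List.slice L (some 1) none)).reverse).foldl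
    (fun (st : Int × Int) q => (2 * min q.1 q.2 + st.2, st.1)) (0, 0)

-- ===== PRECONDITION & SPEC =====
def Spec_choix_paires_imposed_parity (L : List Int) (out : Int × Int) : Prop := out = choix_paires_imposed_parity_alt L
instance (L : List Int) (out : Int × Int) : Decidable (Spec_choix_paires_imposed_parity L out) := by unfold Spec_choix_paires_imposed_parity; infer_instance

-- ===== CLAIM =====
def Claim_equal_choix_paires_imposed_parity : Prop := ∀ (L : List Int), Dom_choix_paires_imposed_parity L → Spec_choix_paires_imposed_parity L (choix_paires_imposed_parity L)

-- ===== LEMMAS AND PROOFS =====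

-- every second element of a list (indices 0, 2, 4, …)
def pvStride2 {α : Type} : List α → List α
  | [] => []
  | [a] => [a]
  | a :: _ :: t => a :: pvStride2 t

theorem pvStride2_cons {α : Type} (x : α) (l : List α) :
    pvStride2 (x :: l) = x :: pvStride2 l.tail := by
  cases l <;> rfl

-- the swap-fold of port B, as a foldr over the pair list
def pvSwapFoldr : List (Int × Int) → Int × Int
  | [] => (0, 0)
  | q :: t => (2 * min q.1 q.2 + (pvSwapFoldr t).2, (pvSwapFoldr t).1)

theorem pvSwapFoldr_eq_strides (z : List (Int × Int)) :
    pvSwapFoldr z = ((pvStride2 (z.map (fun q => 2 * min q.1 q.2))).sum,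
                     (pvStride2 (z.map (fun q => 2 * min q.1 q.2)).tail).sum) := by
  induction z with
  | nil => rfl
  | cons q t ih =>
    simp only [pvSwapFoldr, ih, List.map_cons, pvStride2_cons, List.tail_cons, List.sum_cons]

theorem pvAltFoldr (z : List (Int × Int)) :
    (z.reverse).foldl (fun (st : Int × Int) q => (2 * min q.1 q.2 + st.2, st.1)) (0, 0)
      = pvSwapFoldr z := by
  rw [List.foldl_reverse]
  induction z with
  | nil => rfl
  | cons q t ih => simp only [List.foldr_cons, ih, pvSwapFoldr]

-- the loop body of port A, written on an enumerated pair
def pvBody (st : Int × Int) (p : Int × (Int × Int)) : Int × Int :=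
  if PySem.Int.mod p.1 2 = 0 then
    (st.1 + 2 * min p.2.1 p.2.2, st.2)
  else
    (st.1, st.2 + 2 * min p.2.1 p.2.2)

theorem pvMod2_succ (s : Int) : PySem.Int.mod (s + 1) 2 = 0 ↔ ¬ PySem.Int.mod s 2 = 0 := by
  rw [PySem.Int.mod_eq_emod_of_pos (a := s + 1) (by norm_num),
    PySem.Int.mod_eq_emod_of_pos (a := s) (by norm_num)]
  omega

theorem pvEnumFold (z : List (Int × Int)) :
    ∀ (s p i : Int),
      (PySem.List.enumerate z s).foldl pvBody (p, i)
        = if PySem.Int.mod s 2 = 0 then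
            (p + (pvStride2 (z.map (fun q => 2 * min q.1 q.2))).sum,
             i + (pvStride2 (z.map (fun q => 2 * min q.1 q.2)).tail).sum)
          else
            (p + (pvStride2 (z.map (fun q => 2 * min q.1 q.2)).tail).sum,
             i + (pvStride2 (z.map (fun q => 2 * min q.1 q.2))).sum) := by
  induction z with
  | nil => intro s p i; simp [PySem.List.enumerate_nil, pvStride2]
  | cons a t ih =>
    intro s p i
    rw [PySem.List.enumerate_cons, List.foldl_cons]
    by_cases hs : PySem.Int.mod s 2 = 0
    · have hs1 : ¬ PySem.Int.mod (s + 1) 2 = 0 := by rw [pvMod2_succ]; exact fun h => h hs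
      simp only [pvBody, if_pos hs]
      rw [ih (s + 1) (p + 2 * min a.1 a.2) i]
      simp only [if_neg hs1, List.map_cons, pvStride2_cons, List.tail_cons,
        List.sum_cons, Prod.mk.injEq]
      constructor <;> first | trivial | ring
    · have hs1 : PySem.Int.mod (s + 1) 2 = 0 := by rw [pvMod2_succ]; exact hs
      simp only [pvBody, if_neg hs]
      rw [ih (s + 1) p (i + 2 * min a.1 a.2)]
      simp only [if_pos hs1, List.map_cons, pvStride2_cons, List.tail_cons,
        List.sum_cons, Prod.mk.injEq]
      constructor <;> first | trivial | ring

theorem pvZipGet (x : Int) (xs : List Int) (j : Int)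
    (h0 : 0 ≤ j) (hlt : j < ((x :: xs).zip xs).length) :
    PySem.List.pyGetD ((x :: xs).zip xs) j ((0 : Int), (0 : Int))
      = (PySem.List.pyGetD (x :: xs) j 0, PySem.List.pyGetD (x :: xs) (j + 1) 0) := by
  have hzl : ((x :: xs).zip xs).length = xs.length := by simp
  have hlt' : j < xs.length := by omega
  rw [PySem.List.pyGetD_eq_getElem _ _ h0 (by exact_mod_cast hlt),
    PySem.List.pyGetD_eq_getElem _ _ h0 (by simp; omega),
    PySem.List.pyGetD_eq_getElem _ _ (by omega) (by simp; omega)]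
  have hj1 : (j + 1).toNat = j.toNat + 1 := by omega
  simp only [hj1, List.getElem_zip, List.getElem_cons_succ]

-- ===== VERDICT =====
theorem choix_paires_imposed_parity_spec : Claim_equal_choix_paires_imposed_parity := by
  intro L _
  unfold Spec_choix_paires_imposed_parity
  rcases L with _ | ⟨x, xs⟩
  · rfl
  · unfold choix_paires_imposed_parity choix_paires_imposed_parity_alt
    rw [PySem.List.slice_from_one]
    simp only [List.tail_cons]
    rw [pvAltFoldr, pvSwapFoldr_eq_strides]
    have hlen : PySem.List.len (x :: xs) - 1 = PySem.List.len ((x :: xs).zip xs) := by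
      simp [PySem.List.len_eq]
    rw [hlen]
    have hstep : (PySem.List.pyRange 0 (PySem.List.len ((x :: xs).zip xs)) 1).foldl
        (fun (st : Int × Int) k =>
          if PySem.Int.mod k 2 = 0 then
            (st.1 + 2 * min (PySem.List.pyGetD (x :: xs) k 0) (PySem.List.pyGetD (x :: xs) (k + 1) 0), st.2)
          else
            (st.1, st.2 + 2 * min (PySem.List.pyGetD (x :: xs) k 0) (PySem.List.pyGetD (x :: xs) (k + 1) 0)))
        (0, 0)
        = (PySem.List.pyRange 0 (PySem.List.len ((x :: xs).zip xs)) 1).foldl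
            (fun st k => pvBody st (k, PySem.List.pyGetD ((x :: xs).zip xs) k (0, 0))) (0, 0) := by
      apply PySem.List.foldl_congr_mem
      intro acc j hj
      obtain ⟨h0, hlt⟩ := (PySem.List.mem_pyRange_one).1 hj
      have hlt' : j < ((x :: xs).zip xs).length := by
        rw [PySem.List.len_eq] at hlt; exact_mod_cast hlt
      rw [pvZipGet x xs j h0 hlt']
      rfl
    rw [hstep]
    have hfold : (PySem.List.pyRange 0 (PySem.List.len ((x :: xs).zip xs)) 1).foldl
        (fun st k => pvBody st (k, PySem.List.pyGetD ((x :: xs).zip xs) k (0, 0))) (0, 0)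
        = (PySem.List.enumerate ((x :: xs).zip xs) 0).foldl pvBody (0, 0) := by
      rw [PySem.List.enumerate_eq_map_pyRange ((x :: xs).zip xs) ((0, 0) : Int × Int), List.foldl_map]
    rw [hfold, pvEnumFold ((x :: xs).zip xs) 0 0 0]
    norm_num [PySem.Int.mod]
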